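-- pv_equiv track=rewrite | github.com/dstjr2434/programmers | 프로그래머스/기능개발.py | solution
-- ===== SOURCE A (Python) =====
-- def solution(progresses, speeds):
--
--     answer = []
--     count=0
--
--     while progresses:
--         for i in range(len(progresses)):
--             progresses[i]=progresses[i]+speeds[i]
--         if progresses[0]>=100:
--             while progresses and progresses[0]>=100:
--                 progresses.pop(0)
--                 speeds.pop(0)
--                 count=count+1
--             answer.append(count)
--         count=0
--     return answer
-- ===== SOURCE B (Python) =====
-- def solution(progresses, speeds):
--     answer = []
--     cur_max = 0
--     for p, s in zip(progresses, speeds):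
--         # completion day: first k >= 1 with p + k*s >= 100 (ceil division)
--         d = 1 if p + s >= 100 else -((p - 100) // s)
--         if answer and d <= cur_max:
--             answer[-1] += 1
--         else:
--             answer.append(1)
--             cur_max = d
--     return answer
-- ===== Notes on version B (the rewrite author's own statement) =====
-- stated objective: alternative
-- what changed: B computes each task's completion day once by ceiling division and counts groups in a single running-max pass, instead of A's day-by-day simulation that increments every remaining task and pops the front of the lists.
-- outside the precondition, e.g. on solution([100], [0]): A returns [1], B returns [1]; on solution([104], [-5]): A does not finish within the time limit, B returns [1]; on solution([50], []): A raises IndexError, B returns []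
import Mathlib
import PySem

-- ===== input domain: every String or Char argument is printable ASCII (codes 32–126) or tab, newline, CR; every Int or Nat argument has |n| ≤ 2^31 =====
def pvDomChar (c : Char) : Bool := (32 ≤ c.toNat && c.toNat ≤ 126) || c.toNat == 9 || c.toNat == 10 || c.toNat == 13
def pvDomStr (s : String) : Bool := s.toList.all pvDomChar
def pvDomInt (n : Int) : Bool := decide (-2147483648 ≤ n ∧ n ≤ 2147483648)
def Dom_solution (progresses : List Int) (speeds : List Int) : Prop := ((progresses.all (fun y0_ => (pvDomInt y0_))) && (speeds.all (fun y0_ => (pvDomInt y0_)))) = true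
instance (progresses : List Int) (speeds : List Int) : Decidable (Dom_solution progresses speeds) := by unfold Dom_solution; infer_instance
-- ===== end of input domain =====

-- B replaces A's day-by-day simulation (increment all remaining tasks, pop finished fronts)
-- by one completion day per task (ceiling division) and a single running-max pass; equivalence
-- is about the RETURN value only: the Python A empties its two list arguments in place, B does not mutate them.

-- ===== PORT A =====
-- inner `while progresses and progresses[0] >= 100: pop/pop/count` loop
def popLoopA : List Int → List Int → Int → List Int × List Int × Int
  | p :: ps, s :: ss, c => if 100 ≤ p then popLoopA ps ss (c + 1) else (p :: ps, s :: ss, c)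
  | ps, ss, c => (ps, ss, c)

-- outer `while progresses` loop; the fuel passed by `solution` is large enough for every
-- input admitted by Pre_solution (on non-positive speeds the Python loop can run forever)
def loopA : Nat → List Int → List Int → List Int → List Int
  | 0, _, _, ans => ans
  | fuel + 1, ps, ss, ans =>
    if ps.isEmpty then ans
    else
      -- `for i in range(len(progresses)): progresses[i] += speeds[i]`
      let ps' := List.zipWith (fun p s => p + s) ps ss
      match ps' with
      | [] => ans   -- unreachable under Pre_solution (there Python raises IndexError before this point)
      | p0 :: _ =>
        if 100 ≤ p0 then
          let r := popLoopA ps' ss 0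
          loopA fuel r.1 r.2.1 (ans ++ [r.2.2])
        else loopA fuel ps' ss ans

def solution (progresses : List Int) (speeds : List Int) : List Int :=
  loopA ((progresses.map (fun p => (100 - p).toNat + 1)).sum + 1) progresses speeds []

-- ===== PORT B =====
-- `d = 1 if p + s >= 100 else -((p - 100) // s)`
def dayB (p s : Int) : Int := if 100 ≤ p + s then 1 else -(PySem.Int.floordiv (p - 100) s)

-- the `for p, s in zip(...)` loop; `answer` is kept reversed (head = its last group), so
-- `answer[-1] += 1` is a head update and `answer.append(1)` is a cons; reversed at the end
def loopB : List (Int × Int) → List Int → Int → List Int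
  | [], acc, _ => acc.reverse
  | (p, s) :: rest, acc, m =>
    let d := dayB p s
    match acc with
    | g :: gs => if d ≤ m then loopB rest ((g + 1) :: gs) m else loopB rest (1 :: g :: gs) d
    | [] => loopB rest [1] d

def solution_alt (progresses : List Int) (speeds : List Int) : List Int :=
  loopB (List.zip progresses speeds) [] 0

-- ===== PRECONDITION & SPEC =====
-- Pre_ excludes inputs with fewer speeds than progresses (A raises IndexError) and inputs with a
-- non-positive speed among the first len(progresses) speeds: on most of those A loops forever
-- (a task that never reaches 100), and on the few of them where every such task is already past 100
-- when it reaches the front A happens to return, agreeing with B on the cited example.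
def Pre_solution (progresses : List Int) (speeds : List Int) : Prop :=
  progresses.length ≤ speeds.length ∧ ∀ s ∈ speeds.take progresses.length, 1 ≤ s
instance (progresses : List Int) (speeds : List Int) : Decidable (Pre_solution progresses speeds) := by
  unfold Pre_solution; infer_instance

def pvWitness_solution : List Int × List Int := ([93, 30, 55], [1, 30, 5])

def Spec_solution (progresses : List Int) (speeds : List Int) (out : List Int) : Prop := out = solution_alt progresses speeds
instance (progresses : List Int) (speeds : List Int) (out : List Int) : Decidable (Spec_solution progresses speeds out) := by unfold Spec_solution; infer_instance

-- ===== CLAIM (what is proved, stated in full; the proofs are below) =====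
def Claim_equal_solution : Prop := ∀ (progresses : List Int) (speeds : List Int), Dom_solution progresses speeds → Pre_solution progresses speeds → Spec_solution progresses speeds (solution progresses speeds)

-- ===== LEMMAS AND PROOFS =====

-- completion-day successor: one day of progress lowers the day, floored at 1
def fd (d : Int) : Int := max 1 (d - 1)

-- group sizes of a list of completion days under the running-max rule
def groupsOf : List Int → List Int
  | [] => []
  | d :: rest =>
      (1 + ((rest.takeWhile (fun x => decide (x ≤ d))).length : Int)) ::
        groupsOf (rest.dropWhile (fun x => decide (x ≤ d)))
  termination_by l => l.length
  decreasing_by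
    simp only [List.length_cons]
    exact Nat.lt_succ_of_le (List.length_dropWhile_le _ _)

-- ---- generic list helpers ----
theorem takeWhile_congr' {α : Type} (p q : α → Bool) (l : List α)
    (h : ∀ x ∈ l, p x = q x) : l.takeWhile p = l.takeWhile q := by
  induction l with
  | nil => rfl
  | cons a t ih =>
      have ha := h a (List.mem_cons_self ..)
      simp only [List.takeWhile_cons, ha]
      cases hq : q a with
      | false => simp
      | true => simp [ih fun x hx => h x (List.mem_cons_of_mem _ hx)]

theorem dropWhile_congr' {α : Type} (p q : α → Bool) (l : List α)
    (h : ∀ x ∈ l, p x = q x) : l.dropWhile p = l.dropWhile q := by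
  induction l with
  | nil => rfl
  | cons a t ih =>
      have ha := h a (List.mem_cons_self ..)
      simp only [List.dropWhile_cons, ha]
      cases hq : q a with
      | false => simp
      | true => simp [ih fun x hx => h x (List.mem_cons_of_mem _ hx)]

theorem dropWhile_eq_drop' {α : Type} (p : α → Bool) (l : List α) :
    l.dropWhile p = l.drop (l.takeWhile p).length := by
  induction l with
  | nil => rfl
  | cons a t ih =>
      by_cases h : p a = true
      · simp [List.dropWhile_cons, List.takeWhile_cons, h, ih]
      · simp only [Bool.not_eq_true] at h
        simp [List.dropWhile_cons, List.takeWhile_cons, h]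

theorem head_dropWhile_false' {α : Type} (p : α → Bool) (l : List α) {y : α} {ys : List α}
    (h : l.dropWhile p = y :: ys) : p y = false := by
  induction l with
  | nil => simp at h
  | cons a t ih =>
      by_cases hp : p a = true
      · exact ih (by simpa [List.dropWhile_cons, hp] using h)
      · simp only [Bool.not_eq_true] at hp
        simp [List.dropWhile_cons, hp] at h
        simp [← h.1, hp]

theorem mem_dropWhile' {α : Type} (p : α → Bool) (l : List α) {x : α}
    (h : x ∈ l.dropWhile p) : x ∈ l :=
  (List.dropWhile_sublist p (l := l)).mem h

theorem foldr_max_nonneg (l : List Int) : 0 ≤ l.foldr max 0 := by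
  induction l with
  | nil => simp
  | cons a t ih => simp only [List.foldr_cons]; omega

theorem foldr_max_le (l : List Int) (b : Int) (hb : 0 ≤ b) (h : ∀ x ∈ l, x ≤ b) :
    l.foldr max 0 ≤ b := by
  induction l with
  | nil => simpa
  | cons a t ih =>
      have := h a (List.mem_cons_self ..)
      have := ih fun x hx => h x (List.mem_cons_of_mem _ hx)
      simp only [List.foldr_cons]; omega

theorem le_foldr_max (l : List Int) {x : Int} (h : x ∈ l) : x ≤ l.foldr max 0 := by
  induction l with
  | nil => simp at h
  | cons a t ih =>
      rcases List.mem_cons.mp h with h | h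
      · simp only [List.foldr_cons]; omega
      · have := ih h; simp only [List.foldr_cons]; omega

-- ---- arithmetic about dayB ----
theorem dayB_bracket {p s : Int} (hs : 1 ≤ s) (hlt : ¬ 100 ≤ p + s) :
    (dayB p s - 1) * s < 100 - p ∧ 100 - p ≤ dayB p s * s := by
  have h0 : 0 < s := by omega
  have hpm : p - 100 = -(100 - p) := by ring
  unfold dayB
  rw [if_neg hlt, hpm]
  exact (PySem.Int.neg_floordiv_neg_eq_iff_of_pos h0).mp rfl

theorem dayB_pos {p s : Int} (hs : 1 ≤ s) : 1 ≤ dayB p s := by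
  by_cases h : 100 ≤ p + s
  · simp [dayB, h]
  · obtain ⟨h1, h2⟩ := dayB_bracket hs h
    nlinarith

theorem dayB_two {p s : Int} (hs : 1 ≤ s) (hlt : ¬ 100 ≤ p + s) : 2 ≤ dayB p s := by
  obtain ⟨h1, h2⟩ := dayB_bracket hs hlt
  nlinarith [dayB_pos hs (p := p)]

theorem dayB_le_one_iff {p s : Int} (hs : 1 ≤ s) : dayB p s ≤ 1 ↔ 100 ≤ p + s := by
  constructor
  · intro h
    by_contra hlt
    have := dayB_two hs hlt
    omega
  · intro h
    simp [dayB, h]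

theorem dayB_step {p s : Int} (hs : 1 ≤ s) : dayB (p + s) s = fd (dayB p s) := by
  by_cases h1 : 100 ≤ p + s
  · have h2 : 100 ≤ (p + s) + s := by omega
    simp [dayB, h1, h2, fd]
  · have hc2 : 2 ≤ dayB p s := dayB_two hs h1
    obtain ⟨hb1, hb2⟩ := dayB_bracket hs h1
    by_cases h2 : 100 ≤ (p + s) + s
    · -- the task finishes tomorrow: dayB p s = 2
      have hcle : dayB p s ≤ 2 := by nlinarith
      have h22 : dayB p s = 2 := by omega
      rw [h22]
      have : dayB (p + s) s = 1 := by simp [dayB, h2]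
      rw [this]; rfl
    · have hfd : fd (dayB p s) = dayB p s - 1 := by unfold fd; omega
      rw [hfd]
      have h0 : 0 < s := by omega
      have lhs : dayB (p + s) s = -(PySem.Int.floordiv (-(100 - (p + s))) s) := by
        simp only [dayB, if_neg h2]
        ring_nf
      rw [lhs, PySem.Int.neg_floordiv_neg_eq_iff_of_pos h0]
      constructor
      · nlinarith
      · nlinarith

theorem dayB_le_bnd {p s : Int} (hs : 1 ≤ s) : dayB p s ≤ ((100 - p).toNat : Int) + 1 := by
  by_cases h : 100 ≤ p + s
  · have h1 : dayB p s = 1 := by simp [dayB, h]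
    omega
  · obtain ⟨hb1, hb2⟩ := dayB_bracket hs h
    have hpos := dayB_pos hs (p := p)
    have hcle : dayB p s ≤ 100 - p := by nlinarith
    omega

-- ---- day lists ----
theorem days_pos (ps ss : List Int) (h : ∀ s ∈ ss.take ps.length, 1 ≤ s) :
    ∀ x ∈ List.zipWith dayB ps ss, 1 ≤ x := by
  induction ps generalizing ss with
  | nil => simp
  | cons p pr ih =>
      cases ss with
      | nil => simp
      | cons s sr =>
          intro x hx
          simp only [List.zipWith_cons_cons, List.mem_cons] at hx
          have hs : 1 ≤ s := h s (by simp)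
          rcases hx with rfl | hx
          · exact dayB_pos hs
          · exact ih sr (fun t ht => h t (by simp [List.mem_cons]; right; exact ht)) x hx

theorem days_incr (ps ss : List Int) (h : ∀ s ∈ ss.take ps.length, 1 ≤ s) :
    List.zipWith dayB (List.zipWith (fun p s => p + s) ps ss) ss
      = (List.zipWith dayB ps ss).map fd := by
  induction ps generalizing ss with
  | nil => simp
  | cons p pr ih =>
      cases ss with
      | nil => simp
      | cons s sr =>
          have hs : 1 ≤ s := h s (by simp)
          simp only [List.zipWith_cons_cons, List.map_cons]
          rw [dayB_step hs, ih sr (fun t ht => h t (by simp [List.mem_cons]; right; exact ht))]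

theorem days_bound (ps ss : List Int) (h : ∀ s ∈ ss.take ps.length, 1 ≤ s) :
    ∀ x ∈ List.zipWith dayB ps ss, x ≤ (((ps.map (fun p => (100 - p).toNat + 1)).sum : ℕ) : Int) := by
  induction ps generalizing ss with
  | nil => simp
  | cons p pr ih =>
      cases ss with
      | nil => simp
      | cons s sr =>
          intro x hx
          simp only [List.zipWith_cons_cons, List.mem_cons] at hx
          have hs : 1 ≤ s := h s (by simp)
          simp only [List.map_cons, List.sum_cons]
          rcases hx with rfl | hx
          · calc dayB p s ≤ ((100 - p).toNat : Int) + 1 := dayB_le_bnd hs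
              _ = (((100 - p).toNat + 1 : ℕ) : Int) := by push_cast; ring
              _ ≤ _ := Nat.cast_le.mpr (Nat.le_add_right _ _)
          · calc x ≤ _ := ih sr (fun t ht => h t (by simp [List.mem_cons]; right; exact ht)) x hx
              _ ≤ _ := Nat.cast_le.mpr (Nat.le_add_left _ _)

theorem takeWhile_pop_len (ps ss : List Int) (h : ∀ s ∈ ss.take ps.length, 1 ≤ s) :
    ((List.zipWith (fun p s => p + s) ps ss).takeWhile (fun x => decide (100 ≤ x))).length
      = ((List.zipWith dayB ps ss).takeWhile (fun d => decide (d ≤ 1))).length := by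
  induction ps generalizing ss with
  | nil => simp
  | cons p pr ih =>
      cases ss with
      | nil => simp
      | cons s sr =>
          have hs : 1 ≤ s := h s (by simp)
          by_cases hc : 100 ≤ p + s
          · have hd : dayB p s ≤ 1 := (dayB_le_one_iff hs).mpr hc
            simp only [List.zipWith_cons_cons, List.takeWhile_cons, decide_eq_true_eq, hc,
              if_pos, hd, List.length_cons]
            rw [ih sr (fun t ht => h t (by simp [List.mem_cons]; right; exact ht))]
          · have hd : ¬ dayB p s ≤ 1 := fun h' => hc ((dayB_le_one_iff hs).mp h')
            simp [List.takeWhile_cons, hc, hd]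

theorem zip_map_day (ps ss : List Int) :
    (List.zip ps ss).map (fun x => dayB x.1 x.2) = List.zipWith dayB ps ss := by
  induction ps generalizing ss with
  | nil => simp
  | cons p pr ih =>
      cases ss with
      | nil => simp
      | cons s sr => simp [ih]

-- ---- groupsOf is invariant under one day of progress (head day ≥ 2) ----
theorem groupsOf_map_fd : ∀ (ds : List Int), (∀ x ∈ ds, 1 ≤ x) →
    (∀ d rest, ds = d :: rest → 2 ≤ d) → groupsOf (ds.map fd) = groupsOf ds := by
  intro ds
  induction hn : ds.length using Nat.strong_induction_on generalizing ds with
  | _ n ih =>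
    intro hpos hhead
    cases ds with
    | nil => simp [groupsOf]
    | cons d rest =>
      have hd2 : 2 ≤ d := hhead d rest rfl
      have hcongr : ∀ x ∈ rest,
          ((fun x => decide (x ≤ fd d)) ∘ fd) x = (fun x => decide (x ≤ d)) x := by
        intro x hx
        have hx1 : 1 ≤ x := hpos x (List.mem_cons_of_mem _ hx)
        simp only [Function.comp_apply]
        apply decide_eq_decide.mpr
        unfold fd; omega
      have ht : (rest.map fd).takeWhile (fun x => decide (x ≤ fd d))
          = (rest.takeWhile (fun x => decide (x ≤ d))).map fd := by
        rw [List.takeWhile_map, takeWhile_congr' _ _ rest hcongr]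
      have hdw : (rest.map fd).dropWhile (fun x => decide (x ≤ fd d))
          = (rest.dropWhile (fun x => decide (x ≤ d))).map fd := by
        rw [List.dropWhile_map, dropWhile_congr' _ _ rest hcongr]
      simp only [List.map_cons, groupsOf, ht, hdw, List.length_map]
      refine congrArg _ ?_
      refine ih (rest.dropWhile (fun x => decide (x ≤ d))).length ?_ _ rfl ?_ ?_
      · have := List.length_dropWhile_le (fun x => decide (x ≤ d)) rest
        simp only [List.length_cons] at hn
        omega
      · exact fun x hx => hpos x (List.mem_cons_of_mem _ (mem_dropWhile' _ _ hx))
      · intro y ys hy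
        have hfalse := head_dropWhile_false' _ rest hy
        simp only [decide_eq_false_iff_not, not_le] at hfalse
        omega

-- ---- B's loop computes groupsOf ----
theorem loopB_go (l : List (Int × Int)) : ∀ (g : Int) (gs : List Int) (m : Int),
    loopB l (g :: gs) m
      = gs.reverse ++ (g + (((l.map (fun x => dayB x.1 x.2)).takeWhile (fun d => decide (d ≤ m))).length : Int))
          :: groupsOf ((l.map (fun x => dayB x.1 x.2)).dropWhile (fun d => decide (d ≤ m))) := by
  induction l with
  | nil => intro g gs m; simp [loopB, groupsOf]
  | cons x rest ih =>
      intro g gs m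
      obtain ⟨p, s⟩ := x
      by_cases hd : dayB p s ≤ m
      · have : loopB ((p, s) :: rest) (g :: gs) m = loopB rest ((g + 1) :: gs) m := by
          simp [loopB, hd]
        rw [this, ih]
        simp only [List.map_cons, List.takeWhile_cons, List.dropWhile_cons, decide_eq_true_eq,
          if_pos hd, List.length_cons]
        refine congrArg _ (congrArg₂ _ ?_ rfl)
        push_cast
        ring
      · have : loopB ((p, s) :: rest) (g :: gs) m = loopB rest (1 :: g :: gs) (dayB p s) := by
          simp [loopB, hd]
        rw [this, ih]
        simp only [List.map_cons, List.takeWhile_cons, List.dropWhile_cons, decide_eq_true_eq,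
          if_neg hd, List.length_nil, groupsOf, List.reverse_cons]
        simp

theorem loopB_eq (l : List (Int × Int)) :
    loopB l [] 0 = groupsOf (l.map (fun x => dayB x.1 x.2)) := by
  cases l with
  | nil => simp [loopB, groupsOf]
  | cons x rest =>
      obtain ⟨p, s⟩ := x
      have : loopB ((p, s) :: rest) [] 0 = loopB rest [1] (dayB p s) := by simp [loopB]
      rw [this, loopB_go]
      simp [groupsOf]

-- ---- A's pop loop ----
theorem popLoopA_eq : ∀ (a b : List Int) (c : Int), a.length ≤ b.length →
    popLoopA a b c
      = (a.dropWhile (fun x => decide (100 ≤ x)),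
         b.drop ((a.takeWhile (fun x => decide (100 ≤ x))).length),
         c + ((a.takeWhile (fun x => decide (100 ≤ x))).length : Int)) := by
  intro a
  induction a with
  | nil => intro b c h; simp [popLoopA]
  | cons p a' ih =>
      intro b c h
      cases b with
      | nil => simp at h
      | cons s b' =>
          by_cases hp : 100 ≤ p
          · have : popLoopA (p :: a') (s :: b') c = popLoopA a' b' (c + 1) := by
              simp [popLoopA, hp]
            rw [this, ih b' (c + 1) (by simpa using h)]
            simp only [List.takeWhile_cons, decide_eq_true_eq, if_pos hp, List.dropWhile_cons,
              List.length_cons, List.drop_succ_cons]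
            refine congrArg _ (congrArg _ ?_)
            push_cast
            ring
          · simp [popLoopA, List.takeWhile_cons, List.dropWhile_cons, hp]

-- ---- A's outer loop ----
theorem loopA_eq : ∀ (fuel : Nat) (ps ss ans : List Int),
    ps.length ≤ ss.length → (∀ s ∈ ss.take ps.length, 1 ≤ s) →
    (List.zipWith dayB ps ss).foldr max 0 < (fuel : Int) →
    loopA fuel ps ss ans = ans ++ groupsOf (List.zipWith dayB ps ss) := by
  intro fuel
  induction fuel with
  | zero =>
      intro ps ss ans _ _ hf
      have := foldr_max_nonneg (List.zipWith dayB ps ss)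
      simp at hf
      omega
  | succ fuel ih =>
      intro ps ss ans hlen hss hf
      cases ps with
      | nil => simp [loopA, groupsOf]
      | cons p pr =>
          cases ss with
          | nil => simp at hlen
          | cons s sr =>
              have hs1 : 1 ≤ s := hss s (by simp)
              have hdpos := days_pos (p :: pr) (s :: sr) hss
              have hmemday : dayB p s ∈ List.zipWith dayB (p :: pr) (s :: sr) := by simp
              have hMpos : 1 ≤ (List.zipWith dayB (p :: pr) (s :: sr)).foldr max 0 := by
                have h1 := le_foldr_max _ hmemday
                have h2 := dayB_pos hs1 (p := p)
                omega
              by_cases hc : 100 ≤ p + s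
              · -- front finishes today: pop a group
                have hst : loopA (fuel + 1) (p :: pr) (s :: sr) ans
                    = (fun r : List Int × List Int × Int => loopA fuel r.1 r.2.1 (ans ++ [r.2.2]))
                        (popLoopA (List.zipWith (fun p s => p + s) (p :: pr) (s :: sr)) (s :: sr) 0) := by
                  simp only [loopA, List.isEmpty_cons, List.zipWith_cons_cons]
                  rw [if_neg (by simp), if_pos (by omega)]
                have hlen' : (List.zipWith (fun p s => p + s) (p :: pr) (s :: sr)).length
                    ≤ (s :: sr).length := by
                  simp only [List.length_zipWith]
                  exact min_le_right _ _
                rw [hst, popLoopA_eq _ _ _ hlen']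
                dsimp only
                have hincr := days_incr (p :: pr) (s :: sr) hss
                set ps' := List.zipWith (fun p s => p + s) (p :: pr) (s :: sr) with hps'
                set days := List.zipWith dayB (p :: pr) (s :: sr) with hdays
                set k := (ps'.takeWhile (fun x => decide (100 ≤ x))).length with hkdef
                have hk : k = (days.takeWhile (fun d => decide (d ≤ 1))).length :=
                  takeWhile_pop_len (p :: pr) (s :: sr) hss
                have hlps' : ps'.length = (p :: pr).length := by
                  rw [hps', List.length_zipWith]
                  simp only [List.length_cons] at hlen ⊢
                  omega
                have hkle : k ≤ (p :: pr).length := by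
                  rw [hkdef, ← hlps']
                  exact (List.takeWhile_sublist _).length_le
                -- the new day list is one day of progress on the un-popped suffix
                have hdd : List.zipWith dayB (ps'.dropWhile (fun x => decide (100 ≤ x)))
                      ((s :: sr).drop k)
                    = (days.dropWhile (fun d => decide (d ≤ 1))).map fd := by
                  rw [dropWhile_eq_drop', ← hkdef, ← List.drop_zipWith, hincr, ← List.map_drop]
                  rw [dropWhile_eq_drop' (fun d => decide (d ≤ 1)) days, ← hk]
                -- apply the induction hypothesis to the suffix state
                have hlen'' : (ps'.dropWhile (fun x => decide (100 ≤ x))).length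
                    ≤ ((s :: sr).drop k).length := by
                  rw [dropWhile_eq_drop', ← hkdef]
                  simp only [List.length_drop]
                  omega
                have hss'' : ∀ t ∈ ((s :: sr).drop k).take
                    ((ps'.dropWhile (fun x => decide (100 ≤ x))).length), 1 ≤ t := by
                  intro t ht
                  apply hss
                  have hl2 : (ps'.dropWhile (fun x => decide (100 ≤ x))).length
                      = (p :: pr).length - k := by
                    rw [dropWhile_eq_drop', ← hkdef, List.length_drop, hlps']
                  rw [hl2, ← List.drop_take] at ht
                  exact List.mem_of_mem_drop ht
                have hfuel'' : (List.zipWith dayB (ps'.dropWhile (fun x => decide (100 ≤ x)))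
                    ((s :: sr).drop k)).foldr max 0 < (fuel : Int) := by
                  rw [hdd]
                  cases hdw : days.dropWhile (fun d => decide (d ≤ 1)) with
                  | nil =>
                      simp only [List.map_nil]
                      have : ((0 : Nat) : Int) ≤ (fuel : Int) - 1 + 1 := by push_cast; omega
                      push_cast at hf ⊢
                      simp only [List.foldr_nil]
                      omega
                  | cons y ys =>
                      have hy2 : 2 ≤ y := by
                        have hfalse := head_dropWhile_false' _ days hdw
                        have hymem : y ∈ days := mem_dropWhile' _ _ (by rw [hdw]; simp)
                        have := hdpos y hymem
                        simp only [decide_eq_false_iff_not, not_le] at hfalse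
                        omega
                      have hM2 : 2 ≤ days.foldr max 0 := by
                        have hymem : y ∈ days := mem_dropWhile' _ _ (by rw [hdw]; simp)
                        have := le_foldr_max days hymem
                        omega
                      have hble : ∀ z ∈ (y :: ys).map fd, z ≤ days.foldr max 0 - 1 := by
                        intro z hz
                        simp only [List.mem_map] at hz
                        obtain ⟨x, hx, rfl⟩ := hz
                        have hxmem : x ∈ days := mem_dropWhile' _ _ (by rw [hdw]; exact hx)
                        have := le_foldr_max days hxmem
                        unfold fd; omega
                      have := foldr_max_le ((y :: ys).map fd) (days.foldr max 0 - 1)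
                        (by omega) hble
                      push_cast at hf ⊢
                      omega
                rw [ih _ _ _ hlen'' hss'' hfuel'', hdd]
                -- identify the produced group with the head of groupsOf
                have hday1 : dayB p s = 1 := by simp [dayB, hc]
                have hdays_cons : days = dayB p s :: List.zipWith dayB pr sr := by
                  rw [hdays]; simp
                have htw : days.takeWhile (fun d => decide (d ≤ 1))
                    = dayB p s :: (List.zipWith dayB pr sr).takeWhile (fun d => decide (d ≤ 1)) := by
                  rw [hdays_cons, List.takeWhile_cons, if_pos (by simp [hday1])]
                have hdwd : days.dropWhile (fun d => decide (d ≤ 1))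
                    = (List.zipWith dayB pr sr).dropWhile (fun d => decide (d ≤ 1)) := by
                  rw [hdays_cons, List.dropWhile_cons]
                  simp [hday1]
                have hgmap : groupsOf ((days.dropWhile (fun d => decide (d ≤ 1))).map fd)
                    = groupsOf (days.dropWhile (fun d => decide (d ≤ 1))) := by
                  apply groupsOf_map_fd
                  · exact fun x hx => hdpos x (mem_dropWhile' _ _ hx)
                  · intro d rest hdr
                    have hfalse := head_dropWhile_false' _ days hdr
                    have hdm : d ∈ days := mem_dropWhile' _ _ (by rw [hdr]; simp)
                    have := hdpos d hdm
                    simp only [decide_eq_false_iff_not, not_le] at hfalse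
                    omega
                rw [hgmap]
                have hk2 : k = ((List.zipWith dayB pr sr).takeWhile
                    (fun d => decide (d ≤ 1))).length + 1 := by
                  rw [hk, htw]; simp
                have hgroups : groupsOf days
                    = (0 + (k : Int)) :: groupsOf (days.dropWhile (fun d => decide (d ≤ 1))) := by
                  rw [hdays_cons, hday1, groupsOf]
                  refine congrArg₂ _ ?_ ?_
                  · rw [hk2]; push_cast; ring
                  · refine congrArg _ ?_
                    rw [List.dropWhile_cons]
                    simp
                rw [hgroups]
                simp
              · -- nobody finishes today: one day of progress, same groups
                have hst : loopA (fuel + 1) (p :: pr) (s :: sr) ans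
                    = loopA fuel (List.zipWith (fun p s => p + s) (p :: pr) (s :: sr)) (s :: sr) ans := by
                  simp only [loopA, List.isEmpty_cons, List.zipWith_cons_cons]
                  rw [if_neg (by simp), if_neg (by omega)]
                rw [hst]
                have hincr := days_incr (p :: pr) (s :: sr) hss
                have hlps' : (List.zipWith (fun p s => p + s) (p :: pr) (s :: sr)).length
                    = (p :: pr).length := by
                  rw [List.length_zipWith]
                  simp only [List.length_cons] at hlen ⊢
                  omega
                have hd2 : 2 ≤ dayB p s := dayB_two hs1 hc
                have hM2 : 2 ≤ (List.zipWith dayB (p :: pr) (s :: sr)).foldr max 0 := by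
                  have h1 := le_foldr_max _ hmemday
                  omega
                have hfuel' : (List.zipWith dayB
                    (List.zipWith (fun p s => p + s) (p :: pr) (s :: sr)) (s :: sr)).foldr max 0
                    < (fuel : Int) := by
                  rw [hincr]
                  have hble : ∀ z ∈ (List.zipWith dayB (p :: pr) (s :: sr)).map fd,
                      z ≤ (List.zipWith dayB (p :: pr) (s :: sr)).foldr max 0 - 1 := by
                    intro z hz
                    simp only [List.mem_map] at hz
                    obtain ⟨x, hx, rfl⟩ := hz
                    have := le_foldr_max _ hx
                    unfold fd; omega
                  have := foldr_max_le _ _ (by omega) hble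
                  push_cast at hf ⊢
                  omega
                rw [ih _ _ _ (by rw [hlps']; exact hlen) (by rw [hlps']; exact hss) hfuel', hincr]
                refine congrArg _ ?_
                apply groupsOf_map_fd _ hdpos
                intro d rest hdr
                rw [List.zipWith_cons_cons] at hdr
                have : d = dayB p s := ((List.cons_eq_cons.mp hdr).1).symm
                omega

-- ===== VERDICT (by name: the statement is the Claim_ definition above) =====
theorem solution_spec : Claim_equal_solution := by
  intro ps ss _ hpre
  obtain ⟨hlen, hs⟩ := hpre
  unfold Spec_solution solution solution_alt
  rw [loopB_eq, zip_map_day]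
  rw [loopA_eq _ _ _ _ hlen hs ?_]
  · simp
  · have hb := days_bound ps ss hs
    have : (List.zipWith dayB ps ss).foldr max 0
        ≤ (((ps.map (fun p => (100 - p).toNat + 1)).sum : ℕ) : Int) :=
      foldr_max_le _ _ (by positivity) hb
    exact lt_of_le_of_lt this (by exact_mod_cast Nat.lt_succ_self _)
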